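-- pv_equiv track=rewrite | github.com/ZBQtesla/codejam | TangYuCreated/leetcode/Python/中等题目/318.py | maxProduct
-- ===== SOURCE A (Python) =====
-- def maxProduct(words):
--     """
--     :type words: List[str]
--     :rtype: int
--     """
--     reference = []
--     for word in words:
--         temp = 0
--         for char in word:
--             temp |= 1 << (ord(char) - ord('a'))
--         reference.append(temp)
--     maxLength = 0
--     for first in range(len(reference)):
--         for second in range(first,len(reference)):
--             if not reference[first] & reference[second]:
--                 possible = len(words[first]) * len(words[second])
--                 maxLength = possible if possible > maxLength else maxLength
--     return maxLength
-- ===== SOURCE B (Python) =====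
-- def _wordmask(w):
--     m = 0
--     for c in w:
--         m |= 1 << (ord(c) - ord('a'))
--     return m
--
--
-- def maxProduct(words):
--     """
--     :type words: List[str]
--     :rtype: int
--     """
--     # Sort (mask, length) pairs by length descending, then scan pairs with
--     # early termination: once the best possible remaining product cannot beat
--     # the current best, break out of the loop.
--     pairs = sorted(((_wordmask(w), len(w)) for w in words),
--                    key=lambda p: p[1], reverse=True)
--     best = 0
--     for i, (m1, l1) in enumerate(pairs):
--         if l1 * l1 <= best:
--             break
--         for m2, l2 in pairs[i + 1:]:
--             if l1 * l2 <= best: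
--                 break
--             if m1 & m2 == 0:
--                 best = l1 * l2
--     return best
-- ===== Notes on version B (the rewrite author's own statement) =====
-- stated objective: faster
-- what changed: B sorts the (mask, length) pairs by length descending and scans pairs with early-termination breaks (stopping a row, and the whole scan, as soon as no remaining product can beat the current best), instead of A's exhaustive index-based all-pairs scan including self-pairs.
import Mathlib
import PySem

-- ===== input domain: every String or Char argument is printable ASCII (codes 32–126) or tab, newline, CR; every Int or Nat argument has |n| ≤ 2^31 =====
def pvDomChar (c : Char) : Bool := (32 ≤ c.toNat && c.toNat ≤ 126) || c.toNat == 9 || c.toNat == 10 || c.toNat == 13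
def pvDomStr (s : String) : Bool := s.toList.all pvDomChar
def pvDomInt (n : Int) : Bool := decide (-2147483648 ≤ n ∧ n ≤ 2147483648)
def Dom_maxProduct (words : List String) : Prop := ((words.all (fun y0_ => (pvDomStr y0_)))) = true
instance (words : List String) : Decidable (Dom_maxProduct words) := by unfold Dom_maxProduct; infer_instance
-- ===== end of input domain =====

-- B replaces A's exhaustive index-based all-pairs scan by a sort-by-length-descending
-- scan with early-termination breaks (alternative decomposition, same worst-case cost).


-- ===== PORT A =====
-- temp |= 1 << (ord(char) - ord('a')); exact for chars ≥ 'a' (Pre_ excludes the rest,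
-- where Python raises ValueError on the negative shift and Nat subtraction would clamp).
def pvMaskA (w : String) : Nat :=
  w.toList.foldl (fun temp c => temp ||| (1 <<< (c.toNat - 97))) 0

def maxProduct (words : List String) : Int :=
  let reference := words.foldl (fun acc w => acc ++ [pvMaskA w]) []
  (List.range reference.length).foldl (fun maxLength first =>
    (List.range' first (reference.length - first)).foldl (fun maxLength second =>
      if reference.getD first 0 &&& reference.getD second 0 = 0 then
        let possible : Int :=
          PySem.Str.len (words.getD first "") * PySem.Str.len (words.getD second "")
        if possible > maxLength then possible else maxLength
      else maxLength) maxLength) 0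

-- ===== PORT B =====
def pvMaskB (w : String) : Nat :=
  w.toList.foldl (fun m c => m ||| (1 <<< (c.toNat - 97))) 0

-- inner 'for (m2, l2) in pairs[i+1:]' loop with its two-way break/update
def pvInnerB (m1 : Nat) (l1 : Int) (best : Int) : List (Nat × Int) → Int
  | [] => best
  | (m2, l2) :: rest =>
    if l1 * l2 ≤ best then best
    else pvInnerB m1 l1 (if m1 &&& m2 = 0 then l1 * l2 else best) rest

-- outer 'for i, (m1, l1) in enumerate(pairs)' loop with its break
def pvOuterB (best : Int) : List (Nat × Int) → Int
  | [] => best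
  | (m1, l1) :: rest =>
    if l1 * l1 ≤ best then best
    else pvOuterB (pvInnerB m1 l1 best rest) rest

def maxProduct_alt (words : List String) : Int :=
  let pairs := PySem.List.sorted (words.map (fun w => (pvMaskB w, PySem.Str.len w)))
    (fun p => p.2) true
  pvOuterB 0 pairs

-- ===== PRECONDITION & SPEC =====
-- Pre_ excludes exactly the inputs where a word contains a character below 'a'
-- (ord(c) - ord('a') < 0): there Python A raises ValueError (negative shift count).
def Pre_maxProduct (words : List String) : Prop :=
  (words.all (fun w => w.toList.all (fun c => 97 ≤ c.toNat))) = true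
instance (words : List String) : Decidable (Pre_maxProduct words) := by
  unfold Pre_maxProduct; infer_instance
def pvWitness_maxProduct : List String := ["ab", "cz"]

def Spec_maxProduct (words : List String) (out : Int) : Prop := out = maxProduct_alt words
instance (words : List String) (out : Int) : Decidable (Spec_maxProduct words out) := by
  unfold Spec_maxProduct; infer_instance

-- ===== CLAIM (what is proved, stated in full; the proofs are below) =====
def Claim_equal_maxProduct : Prop := ∀ (words : List String), Dom_maxProduct words →
  Pre_maxProduct words → Spec_maxProduct words (maxProduct words)

-- ===== LEMMAS AND PROOFS =====

-- the product contributed by the pair (m1,l1),(m2,l2): l1*l2 if masks disjoint, else 0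
def pvTerm (m1 : Nat) (l1 : Int) (p : Nat × Int) : Int :=
  if m1 &&& p.1 = 0 then l1 * p.2 else 0

-- max of pvTerm over a list
def pvRow (m1 : Nat) (l1 : Int) : List (Nat × Int) → Int
  | [] => 0
  | p :: rest => max (pvTerm m1 l1 p) (pvRow m1 l1 rest)

-- max product over all unordered pairs of distinct positions
def pvPmax : List (Nat × Int) → Int
  | [] => 0
  | (m, l) :: rest => max (pvRow m l rest) (pvPmax rest)

theorem pvRow_nonneg (m1 : Nat) (l1 : Int) (ps : List (Nat × Int)) : 0 ≤ pvRow m1 l1 ps := by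
  induction ps with
  | nil => simp [pvRow]
  | cons p rest ih => simp only [pvRow]; omega

theorem pvPmax_nonneg (ps : List (Nat × Int)) : 0 ≤ pvPmax ps := by
  induction ps with
  | nil => simp [pvPmax]
  | cons p rest ih => obtain ⟨m, l⟩ := p; simp only [pvPmax]; omega

theorem pvRow_le (m1 : Nat) (l1 : Int) (ps : List (Nat × Int)) (c : Int)
    (hc : 0 ≤ c) (h : ∀ p ∈ ps, l1 * p.2 ≤ c) : pvRow m1 l1 ps ≤ c := by
  induction ps with
  | nil => simpa [pvRow]
  | cons p rest ih =>
    have hp := h p (by simp)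
    have := ih (fun q hq => h q (by simp [hq]))
    simp only [pvRow, pvTerm]
    split <;> omega

theorem pvPmax_le (ps : List (Nat × Int)) (L : Int) (hL : 0 ≤ L)
    (h : ∀ p ∈ ps, 0 ≤ p.2 ∧ p.2 ≤ L) : pvPmax ps ≤ L * L := by
  induction ps with
  | nil => simp only [pvPmax]; positivity
  | cons p rest ih =>
    obtain ⟨m, l⟩ := p
    have hl := h (m, l) (by simp)
    have hrow : pvRow m l rest ≤ L * L := by
      apply pvRow_le _ _ _ _ (by positivity)
      intro q hq
      have hq2 := h q (by simp [hq])
      calc l * q.2 ≤ L * q.2 := by apply mul_le_mul_of_nonneg_right hl.2 hq2.1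
        _ ≤ L * L := by apply mul_le_mul_of_nonneg_left hq2.2 hL
    have := ih (fun q hq => h q (by simp [hq]))
    simp only [pvPmax]; omega

theorem pvTerm_symm (m1 m2 : Nat) (l1 l2 : Int) :
    pvTerm m1 l1 (m2, l2) = pvTerm m2 l2 (m1, l1) := by
  simp only [pvTerm, Nat.and_comm m1 m2, mul_comm l1 l2]

theorem pvRow_perm (m1 : Nat) (l1 : Int) {ps qs : List (Nat × Int)} (h : ps.Perm qs) :
    pvRow m1 l1 ps = pvRow m1 l1 qs := by
  induction h with
  | nil => rfl
  | cons x _ ih => simp only [pvRow, ih]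
  | swap x y l => simp only [pvRow]; omega
  | trans _ _ ih1 ih2 => omega

theorem pvPmax_perm {ps qs : List (Nat × Int)} (h : ps.Perm qs) :
    pvPmax ps = pvPmax qs := by
  induction h with
  | nil => rfl
  | cons x h ih =>
    obtain ⟨m, l⟩ := x
    simp only [pvPmax, ih, pvRow_perm m l h]
  | swap x y l =>
    obtain ⟨mx, lx⟩ := x
    obtain ⟨my, ly⟩ := y
    simp only [pvPmax, pvRow, pvTerm_symm my mx ly lx]
    omega
  | trans _ _ ih1 ih2 => omega

-- ===== B equals pvPmax on a length-sorted, nonnegative list =====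

theorem pvInnerB_eq (m1 : Nat) (l1 : Int) (hl1 : 0 ≤ l1) :
    ∀ (ps : List (Nat × Int)) (best : Int), 0 ≤ best →
    ps.Pairwise (fun a b => b.2 ≤ a.2) → (∀ p ∈ ps, 0 ≤ p.2) →
    pvInnerB m1 l1 best ps = max best (pvRow m1 l1 ps) := by
  intro ps
  induction ps with
  | nil => intro best hb _ _; simp only [pvInnerB, pvRow]; omega
  | cons p rest ih =>
    intro best hb hsort hpos
    obtain ⟨m2, l2⟩ := p
    have hrest_le : ∀ q ∈ rest, q.2 ≤ l2 := by
      intro q hq; exact (List.pairwise_cons.1 hsort).1 q hq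
    have hrow_nn := pvRow_nonneg m1 l1 rest
    simp only [pvInnerB]
    by_cases hbrk : l1 * l2 ≤ best
    · simp only [if_pos hbrk]
      have hrow : pvRow m1 l1 rest ≤ best := by
        apply pvRow_le _ _ _ _ hb
        intro q hq
        calc l1 * q.2 ≤ l1 * l2 := mul_le_mul_of_nonneg_left (hrest_le q hq) hl1
          _ ≤ best := hbrk
      simp only [pvRow, pvTerm]
      split <;> omega
    · simp only [if_neg hbrk]
      by_cases hd : m1 &&& m2 = 0
      · rw [if_pos hd,
          ih (l1 * l2) (by omega) (List.pairwise_cons.1 hsort).2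
            (fun q hq => hpos q (by simp [hq]))]
        simp only [pvRow, pvTerm, hd, if_pos]
        omega
      · rw [if_neg hd, ih best hb (List.pairwise_cons.1 hsort).2
            (fun q hq => hpos q (by simp [hq]))]
        simp only [pvRow, pvTerm, hd, if_false]
        omega

theorem pvOuterB_eq :
    ∀ (ps : List (Nat × Int)) (best : Int), 0 ≤ best →
    ps.Pairwise (fun a b => b.2 ≤ a.2) →
    (∀ p ∈ ps, 0 ≤ p.2) →
    pvOuterB best ps = max best (pvPmax ps) := by
  intro ps
  induction ps with
  | nil => intro best hb _ _; simp only [pvOuterB, pvPmax]; omega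
  | cons p rest ih =>
    intro best hb hsort hpos
    obtain ⟨m1, l1⟩ := p
    have hl1 : 0 ≤ l1 := hpos (m1, l1) (by simp)
    have hrest_le : ∀ q ∈ rest, q.2 ≤ l1 := fun q hq => (List.pairwise_cons.1 hsort).1 q hq
    have hpos' : ∀ q ∈ rest, 0 ≤ q.2 := fun q hq => hpos q (by simp [hq])
    simp only [pvOuterB]
    by_cases hbrk : l1 * l1 ≤ best
    · simp only [if_pos hbrk]
      have hrow : pvRow m1 l1 rest ≤ best := by
        apply pvRow_le _ _ _ _ hb
        intro q hq
        calc l1 * q.2 ≤ l1 * l1 := mul_le_mul_of_nonneg_left (hrest_le q hq) hl1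
          _ ≤ best := hbrk
      have hpm : pvPmax rest ≤ best := by
        have := pvPmax_le rest l1 hl1 (fun q hq => ⟨hpos' q hq, hrest_le q hq⟩)
        omega
      simp only [pvPmax]; omega
    · simp only [if_neg hbrk]
      rw [pvInnerB_eq m1 l1 hl1 rest best hb (List.pairwise_cons.1 hsort).2 hpos',
        ih _ (by have := pvRow_nonneg m1 l1 rest; omega) (List.pairwise_cons.1 hsort).2 hpos']
      simp only [pvPmax]; omega

-- ===== A equals pvPmax on the original pair list =====

-- every word's pair: (mask, length)
def pvPair (w : String) : Nat × Int := (pvMaskA w, PySem.Str.len w)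

theorem pvMaskA_le_foldl (cs : List Char) :
    ∀ t : Nat, t ≤ cs.foldl (fun a c => a ||| (1 <<< (c.toNat - 97))) t := by
  induction cs with
  | nil => intro t; simp
  | cons c cs ih =>
    intro t
    calc t ≤ t ||| (1 <<< (c.toNat - 97)) := Nat.left_le_or
      _ ≤ _ := ih _

theorem pvMaskA_eq_zero {w : String} (h : pvMaskA w = 0) : PySem.Str.len w = 0 := by
  cases hw : w.toList with
  | nil => simp [PySem.Str.len_eq, hw]
  | cons c cs =>
    exfalso
    have h1 : (1 : Nat) ≤ pvMaskA w := by
      unfold pvMaskA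
      rw [hw]
      simp only [List.foldl_cons, Nat.zero_or]
      calc (1 : Nat) ≤ 1 <<< (c.toNat - 97) := by
            rw [Nat.shiftLeft_eq, one_mul]; exact Nat.one_le_two_pow
        _ ≤ _ := pvMaskA_le_foldl cs _
    omega

theorem pvStrLen_nonneg (w : String) : 0 ≤ PySem.Str.len w := by
  simp [PySem.Str.len_eq]

-- bridging index lookups to pvPair of the k-th word
theorem pvRef_getD (words : List String) (k : Nat) :
    (words.map pvMaskA).getD k 0 = pvMaskA (words.getD k "") := by
  by_cases h : k < words.length
  · simp [List.getD, h]
  · simp [List.getD, List.getElem?_eq_none (by omega : words.length ≤ k),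
      List.getElem?_map, pvMaskA]

-- inner loop of A over range' (k) …, for a fixed first index, equals max acc (pvRow …)
theorem pvInnerA_eq (words : List String) (mf : Nat) (lf : Int) :
    ∀ (tl : List (Nat × Int)) (k : Nat) (acc : Int), 0 ≤ acc →
    (words.map pvPair).drop k = tl →
    (List.range' k tl.length).foldl (fun acc second =>
      if mf &&& (words.map pvMaskA).getD second 0 = 0 then
        if lf * PySem.Str.len (words.getD second "") > acc then
          lf * PySem.Str.len (words.getD second "") else acc
      else acc) acc = max acc (pvRow mf lf tl) := by
  intro tl
  induction tl with
  | nil => intro k acc hacc _; simp only [List.length_nil, List.range'_zero, List.foldl_nil, pvRow]; omega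
  | cons p tl' ih =>
    intro k acc hacc hdrop
    have hk : k < (words.map pvPair).length := by
      by_contra h
      rw [List.drop_eq_nil_of_le (by omega)] at hdrop
      exact (List.cons_ne_nil _ _) hdrop.symm
    have hget : (words.map pvPair)[k] = p := by
      have := List.getElem_cons_drop (as := words.map pvPair) (i := k) hk
      rw [hdrop] at this
      exact (List.cons_eq_cons.1 this.symm).1.symm
    have hkw : k < words.length := by simpa using hk
    have hwp : pvPair (words.getD k "") = p := by
      rw [List.getD, List.getElem?_eq_getElem hkw]
      simpa using hget
    have hdrop' : (words.map pvPair).drop (k + 1) = tl' := by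
      have := List.getElem_cons_drop (as := words.map pvPair) (i := k) hk
      rw [hdrop, hget] at this
      exact (List.cons_eq_cons.1 this.symm).2.symm
    rw [List.length_cons, List.range'_succ, List.foldl_cons]
    have hmask : (words.map pvMaskA).getD k 0 = p.1 := by
      rw [pvRef_getD, ← hwp]; rfl
    have hlen : PySem.Str.len (words.getD k "") = p.2 := by rw [← hwp]; rfl
    have hstep : (if mf &&& (words.map pvMaskA).getD k 0 = 0 then
        if lf * PySem.Str.len (words.getD k "") > acc then
          lf * PySem.Str.len (words.getD k "") else acc
      else acc) = max acc (pvTerm mf lf p) := by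
      rw [hmask, hlen, pvTerm]
      split <;> omega
    rw [hstep, ih (k + 1) _ (by have := pvRow_nonneg mf lf [p]; simp only [pvRow] at this; omega) hdrop']
    simp only [pvRow]
    omega

-- outer loop of A equals max acc (pvPmax …)
theorem pvOuterA_eq (words : List String)
    (hmask0 : ∀ w ∈ words, pvMaskA w = 0 → PySem.Str.len w = 0) :
    ∀ (tl : List (Nat × Int)) (k : Nat) (acc : Int), 0 ≤ acc →
    (words.map pvPair).drop k = tl →
    (List.range' k tl.length).foldl (fun maxLength first =>
      (List.range' first ((words.map pvMaskA).length - first)).foldl (fun maxLength second =>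
        if (words.map pvMaskA).getD first 0 &&& (words.map pvMaskA).getD second 0 = 0 then
          if PySem.Str.len (words.getD first "") * PySem.Str.len (words.getD second "") > maxLength then
            PySem.Str.len (words.getD first "") * PySem.Str.len (words.getD second "") else maxLength
        else maxLength) maxLength) acc = max acc (pvPmax tl) := by
  intro tl
  induction tl with
  | nil => intro k acc hacc _; simp only [List.length_nil, List.range'_zero, List.foldl_nil, pvPmax]; omega
  | cons p tl' ih =>
    intro k acc hacc hdrop
    have hk : k < (words.map pvPair).length := by
      by_contra h
      rw [List.drop_eq_nil_of_le (by omega)] at hdrop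
      exact (List.cons_ne_nil _ _) hdrop.symm
    have hget : (words.map pvPair)[k] = p := by
      have := List.getElem_cons_drop (as := words.map pvPair) (i := k) hk
      rw [hdrop] at this
      exact (List.cons_eq_cons.1 this.symm).1.symm
    have hkw : k < words.length := by simpa using hk
    have hwp : pvPair (words.getD k "") = p := by
      rw [List.getD, List.getElem?_eq_getElem hkw]
      simpa using hget
    have hdrop' : (words.map pvPair).drop (k + 1) = tl' := by
      have := List.getElem_cons_drop (as := words.map pvPair) (i := k) hk
      rw [hdrop, hget] at this
      exact (List.cons_eq_cons.1 this.symm).2.symm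
    have hmask : (words.map pvMaskA).getD k 0 = p.1 := by
      rw [pvRef_getD, ← hwp]; rfl
    have hlen : PySem.Str.len (words.getD k "") = p.2 := by rw [← hwp]; rfl
    have hmem : words.getD k "" ∈ words := by
      rw [List.getD, List.getElem?_eq_getElem hkw]; exact List.getElem_mem _
    rw [List.length_cons, List.range'_succ, List.foldl_cons]
    -- the first (= k) iteration of the inner loop over range' k ((map).length - k)
    have hlenmap : (words.map pvMaskA).length - k = tl'.length + 1 := by
      have h1 : ((words.map pvPair).drop k).length = (words.map pvPair).length - k := by
        simp
      rw [hdrop] at h1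
      simp only [List.length_cons, List.length_map] at h1 ⊢
      omega
    rw [hlenmap, List.range'_succ, List.foldl_cons]
    -- self-pair step leaves acc unchanged
    have hself : (if (words.map pvMaskA).getD k 0 &&& (words.map pvMaskA).getD k 0 = 0 then
        if PySem.Str.len (words.getD k "") * PySem.Str.len (words.getD k "") > acc then
          PySem.Str.len (words.getD k "") * PySem.Str.len (words.getD k "") else acc
      else acc) = acc := by
      rw [hmask, hlen, Nat.and_self]
      by_cases h0 : p.1 = 0
      · have : p.2 = 0 := by
          have := hmask0 _ hmem (by rw [← hwp] at h0; exact h0)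
          rw [hlen] at this; exact this
        rw [if_pos h0, this]
        simp only [mul_zero]
        omega
      · rw [if_neg h0]
    rw [hself]
    have hinner := pvInnerA_eq words p.1 p.2 tl' (k + 1) acc hacc hdrop'
    have hinner' :
        (List.range' (k+1) tl'.length).foldl (fun acc second =>
          if (words.map pvMaskA).getD k 0 &&& (words.map pvMaskA).getD second 0 = 0 then
            if PySem.Str.len (words.getD k "") * PySem.Str.len (words.getD second "") > acc then
              PySem.Str.len (words.getD k "") * PySem.Str.len (words.getD second "") else acc
          else acc) acc = max acc (pvRow p.1 p.2 tl') := by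
      rw [← hinner]
      apply PySem.List.foldl_congr_mem
      intro a b _
      rw [hmask, hlen]
    rw [hinner',
      ih (k + 1) _ (by have := pvRow_nonneg p.1 p.2 tl'; omega) hdrop']
    obtain ⟨m, l⟩ := p
    simp only [pvPmax]
    omega

theorem maxProduct_eq_pvPmax (words : List String)
    (hmask0 : ∀ w ∈ words, pvMaskA w = 0 → PySem.Str.len w = 0) :
    maxProduct words = pvPmax (words.map pvPair) := by
  simp only [maxProduct, PySem.List.foldl_append_singleton_eq_map, List.nil_append,
    List.range_eq_range']
  have h := pvOuterA_eq words hmask0 (words.map pvPair) 0 0 le_rfl (by simp)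
  simp only [List.length_map] at h ⊢
  rw [h]
  have := pvPmax_nonneg (words.map pvPair)
  omega

theorem maxProduct_alt_eq_pvPmax (words : List String) :
    maxProduct_alt words = pvPmax (words.map pvPair) := by
  unfold maxProduct_alt
  have hmB : (fun w => (pvMaskB w, PySem.Str.len w)) = pvPair := by
    funext w; rfl
  rw [hmB]
  set srt := PySem.List.sorted (words.map pvPair) (fun p => p.2) true with hsrt
  have hperm : srt.Perm (words.map pvPair) := PySem.List.sorted_perm _ _ _
  have hsorted : srt.Pairwise (fun a b => b.2 ≤ a.2) := PySem.List.sorted_pairwise_rev _ _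
  have hpos : ∀ p ∈ srt, 0 ≤ p.2 := by
    intro p hp
    have : p ∈ words.map pvPair := hperm.mem_iff.1 hp
    obtain ⟨w, _, hw⟩ := List.mem_map.1 this
    rw [← hw]
    exact pvStrLen_nonneg w
  rw [pvOuterB_eq srt 0 le_rfl hsorted hpos, pvPmax_perm hperm]
  have := pvPmax_nonneg (words.map pvPair)
  omega

-- ===== VERDICT (by name: the statement is the Claim_ definition above) =====
theorem maxProduct_spec : Claim_equal_maxProduct := by
  unfold Claim_equal_maxProduct
  intro words _ hpre
  unfold Spec_maxProduct
  rw [maxProduct_alt_eq_pvPmax, maxProduct_eq_pvPmax]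
  intro w hw h0
  exact pvMaskA_eq_zero h0
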